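-- pv_equiv track=rewrite | github.com/mdiazv/codejam | 2010/qual/c/c.py | solve
-- ===== SOURCE A (Python) =====
-- def solve(R, K, N, Gs):
--     def step(i):
--         start_i, steps, euro = i, 0, 0
--         while euro + Gs[i] <= K and steps < N:
--             euro += Gs[i]
--             steps += 1
--             i = (i+1) % N
--         return euro, i
--
--     seen_at = {}
--     i, r, euro = 0, 0, 0
--     while r < R:
--         seen_at[i] = (r, euro)
--         s_euro, i = step(i)
--         euro += s_euro
--         r += 1
--         # Modular simplification upon finding first loop
--         if i in seen_at:
--             c_start, c_start_euro = seen_at[i]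
--             c_len = r - c_start
--             c_euro = euro - c_start_euro
--             # speed up
--             R -= c_start
--             times = R // c_len
--             R %= c_len
--             euro = c_start_euro + c_euro * times
--             seen_at = {}
--             r = 0
--
--     return euro
-- ===== SOURCE B (Python) =====
-- def solve(R, K, N, Gs):
--     # Precompute (gain, next-start) for every start once, then do a single
--     # rho-style walk from 0 with prefix sums and one closed-form cycle formula.
--     if R <= 0 or N <= 0:
--         return 0
--
--     def ride(s):
--         e, t, j = 0, 0, s
--         while t < N and e + Gs[j] <= K:
--             e += Gs[j]
--             t += 1
--             j = (j + 1) % N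
--         return e, j
--
--     table = [ride(s) for s in range(N)]
--
--     first = {}
--     prefix = [0]
--     i, k, tot = 0, 0, 0
--     while k < R and i not in first:
--         first[i] = k
--         g, nx = table[i]
--         tot += g
--         prefix.append(tot)
--         i = nx
--         k += 1
--     if k >= R:
--         return tot
--     q = first[i]
--     L = k - q
--     C = tot - prefix[q]
--     rem = R - q
--     return prefix[q] + (rem // L) * C + prefix[q + rem % L] - prefix[q]
-- ===== Notes on version B (the rewrite author's own statement) =====
-- stated objective: alternative
-- what changed: B precomputes the (gain, next-start) table for all N starts up front and then does a single rho-style walk from start 0 with prefix sums and one closed-form tail+cycle formula, instead of A's lazy per-ride stepping with a seen-dict that is repeatedly reset and the ride budget repeatedly reduced modulo each newly detected cycle; B trades the laziness (it always pays O(N^2) for the table, where A only steps through visited starts) for the one-pass walk and single formula.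
-- outside the precondition, e.g. on solve(1, 0, 2, [1]): A returns 0, B raises IndexError
import Mathlib
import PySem

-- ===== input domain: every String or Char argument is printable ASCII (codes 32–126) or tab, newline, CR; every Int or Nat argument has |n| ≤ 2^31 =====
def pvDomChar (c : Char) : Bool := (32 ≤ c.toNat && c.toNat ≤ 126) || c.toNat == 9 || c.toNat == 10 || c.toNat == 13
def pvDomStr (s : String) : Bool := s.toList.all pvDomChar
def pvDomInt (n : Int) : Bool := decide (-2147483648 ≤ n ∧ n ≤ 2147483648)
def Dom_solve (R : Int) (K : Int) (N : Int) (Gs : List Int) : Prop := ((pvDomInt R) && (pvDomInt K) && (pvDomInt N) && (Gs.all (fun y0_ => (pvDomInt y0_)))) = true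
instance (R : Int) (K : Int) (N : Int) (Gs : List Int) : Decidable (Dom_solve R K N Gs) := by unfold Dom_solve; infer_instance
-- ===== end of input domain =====

-- B replaces A's lazy per-ride stepping with repeatedly reset seen-dict and repeated
-- modular reductions of R by a precomputed (gain, next)-table plus one rho-style walk
-- with a single closed-form tail+cycle formula (objective: alternative; return value only).

-- ===== PORT A =====
-- A's inner `step(i)` while loop; Gs[i] is ported with pyGetD (on inputs admitted by
-- Pre_solve every reached index is in range, so the default is never read).
def solveStep (K : Int) (N : Int) (Gs : List Int) (i : Int) (steps : Int) (euro : Int) : Int × Int :=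
  if _h : euro + PySem.List.pyGetD Gs i 0 ≤ K ∧ steps < N then
    solveStep K N Gs (PySem.Int.mod (i + 1) N) (steps + 1) (euro + PySem.List.pyGetD Gs i 0)
  else (euro, i)
termination_by (N - steps).toNat
decreasing_by omega

-- A's outer while loop; the proof argument `hs` (dict values were recorded at earlier,
-- nonnegative r) is only there to justify termination, it changes no computation.
def solveLoop (K : Int) (N : Int) (Gs : List Int) (R : Int) (r : Int) (euro : Int) (i : Int)
    (seen : PySem.Dict Int (Int × Int))
    (hs : seen.keys.Nodup ∧ 0 ≤ r ∧ ∀ p ∈ seen.items, 0 ≤ p.2.1 ∧ p.2.1 < r) : Int :=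
  if hr : r < R then
    let seen' := seen.insert i (r, euro)
    have hn' : seen'.keys.Nodup := PySem.Dict.nodup_keys_insert _ _ _ hs.1
    have hb' : ∀ p ∈ seen'.items, 0 ≤ p.2.1 ∧ p.2.1 < r + 1 := by
      intro p hp
      rcases (PySem.Dict.mem_items_insert _ _ _ _).mp hp with h1 | h2
      · have := hs.2.1; simp [h1]; omega
      · have := hs.2.2 p h2.1; omega
    let s := solveStep K N Gs i 0 0
    match hm : seen'.get? s.2 with
    | some c =>
      have hmem : (s.2, c) ∈ seen'.items := PySem.Dict.mem_items_of_get?_eq_some _ hm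
      have hcb : 0 ≤ c.1 ∧ c.1 < r + 1 := hb' _ hmem
      have hclen : 0 < (r + 1) - c.1 := by omega
      have hmnn : 0 ≤ PySem.Int.mod (R - c.1) ((r + 1) - c.1) := PySem.Int.mod_nonneg _ hclen
      have hmlt : PySem.Int.mod (R - c.1) ((r + 1) - c.1) ≤ R - r - 1 := by
        have hid := PySem.Int.floordiv_mul_add_mod (R - c.1) ((r + 1) - c.1)
        have hfd : 1 ≤ PySem.Int.floordiv (R - c.1) ((r + 1) - c.1) := by
          rw [PySem.Int.le_floordiv_iff_mul_le hclen]; omega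
        nlinarith [hid, hfd, hclen]
      solveLoop K N Gs (PySem.Int.mod (R - c.1) ((r + 1) - c.1)) 0
        (c.2 + ((euro + s.1) - c.2) * PySem.Int.floordiv (R - c.1) ((r + 1) - c.1))
        s.2 PySem.Dict.empty (by refine ⟨?_, ?_⟩ <;> simp [PySem.Dict.empty, PySem.Dict.keys])
    | none =>
      solveLoop K N Gs R (r + 1) (euro + s.1) s.2 seen' ⟨hn', by omega, hb'⟩
  else euro
termination_by (R - r).toNat
decreasing_by
  · omega
  · omega

def solve (R : Int) (K : Int) (N : Int) (Gs : List Int) : Int :=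
  solveLoop K N Gs R 0 0 0 PySem.Dict.empty
    (by refine ⟨?_, ?_⟩ <;> simp [PySem.Dict.empty, PySem.Dict.keys])

-- ===== PORT B =====
-- B's per-start `ride(s)` while loop (state e, t, j).
def rideB (K : Int) (N : Int) (Gs : List Int) (e : Int) (t : Int) (j : Int) : Int × Int :=
  if _h : t < N ∧ e + PySem.List.pyGetD Gs j 0 ≤ K then
    rideB K N Gs (e + PySem.List.pyGetD Gs j 0) (t + 1) (PySem.Int.mod (j + 1) N)
  else (e, j)
termination_by (N - t).toNat
decreasing_by omega

-- B's single walk loop over the functional graph, recording first-visit indices and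
-- prefix sums; `first[i]` is ported with getD (the branch runs only when i is a key).
def walkB (R : Int) (table : List (Int × Int)) (first : PySem.Dict Int Int)
    (prefixes : List Int) (i : Int) (k : Int) (tot : Int) : Int :=
  if h : k < R ∧ ¬ first.contains i then
    let p := PySem.List.pyGetD table i (0, 0)
    walkB R table (first.insert i k) (prefixes ++ [tot + p.1]) p.2 (k + 1) (tot + p.1)
  else if R ≤ k then tot
  else
    let q := first.getD i 0
    let L := k - q
    let C := tot - PySem.List.pyGetD prefixes q 0
    let rem := R - q
    PySem.List.pyGetD prefixes q 0 + PySem.Int.floordiv rem L * C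
      + PySem.List.pyGetD prefixes (q + PySem.Int.mod rem L) 0
      - PySem.List.pyGetD prefixes q 0
termination_by (R - k).toNat
decreasing_by omega

def solve_alt (R : Int) (K : Int) (N : Int) (Gs : List Int) : Int :=
  if R ≤ 0 ∨ N ≤ 0 then 0
  else
    walkB R ((PySem.List.pyRange 0 N 1).map (fun s => rideB K N Gs 0 0 s))
      PySem.Dict.empty [0] 0 0 0

-- ===== PRECONDITION & SPEC =====
-- Pre_ excludes inputs on which A's simulation can index Gs out of range (Gs empty with
-- R > 0, or N > len(Gs)): there A raises IndexError or, on some of these malformed inputs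
-- (in the original problem N is by definition len(Gs)), happens to return before reaching
-- a bad index while B's table precomputation raises.
def Pre_solve (R : Int) (K : Int) (N : Int) (Gs : List Int) : Prop :=
  R ≤ 0 ∨ (Gs ≠ [] ∧ N ≤ (Gs.length : Int))
instance (R : Int) (K : Int) (N : Int) (Gs : List Int) : Decidable (Pre_solve R K N Gs) := by
  unfold Pre_solve; infer_instance

def pvWitness_solve : Int × Int × Int × List Int := (4, 6, 3, [2, 2, 2])

def Spec_solve (R : Int) (K : Int) (N : Int) (Gs : List Int) (out : Int) : Prop := out = solve_alt R K N Gs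
instance (R : Int) (K : Int) (N : Int) (Gs : List Int) (out : Int) : Decidable (Spec_solve R K N Gs out) := by unfold Spec_solve; infer_instance

-- ===== CLAIM (what is proved, stated in full; the proofs are below) =====
def Claim_equal_solve : Prop := ∀ (R : Int) (K : Int) (N : Int) (Gs : List Int), Dom_solve R K N Gs → Pre_solve R K N Gs → Spec_solve R K N Gs (solve R K N Gs)

-- ===== LEMMAS AND PROOFS =====

-- The common yardstick: position and accumulated euros after m rides starting at i0.
def trajA (K : Int) (N : Int) (Gs : List Int) (i0 : Int) : Nat → Int × Int
  | 0 => (i0, 0)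
  | m + 1 =>
    let p := trajA K N Gs i0 m
    let s := solveStep K N Gs p.1 0 0
    (s.2, p.2 + s.1)

lemma traj_shift (K N : Int) (Gs : List Int) (i0 : Int) (q : Nat) :
    ∀ t, trajA K N Gs (trajA K N Gs i0 q).1 t
      = ((trajA K N Gs i0 (q + t)).1, (trajA K N Gs i0 (q + t)).2 - (trajA K N Gs i0 q).2) := by
  intro t
  induction t with
  | zero => simp [trajA]
  | succ t ih =>
    have : q + (t + 1) = (q + t) + 1 := by omega
    rw [this, trajA, trajA, ih]
    simp [trajA]
    ring

lemma traj_periodic (K N : Int) (Gs : List Int) (i0 : Int) (q L : Nat)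
    (hp : (trajA K N Gs i0 (q + L)).1 = (trajA K N Gs i0 q).1) :
    ∀ t, (trajA K N Gs i0 (q + L + t)).1 = (trajA K N Gs i0 (q + t)).1 ∧
         (trajA K N Gs i0 (q + L + t)).2
           = (trajA K N Gs i0 (q + t)).2
             + ((trajA K N Gs i0 (q + L)).2 - (trajA K N Gs i0 q).2) := by
  intro t
  induction t with
  | zero => constructor <;> simp [hp]
  | succ t ih =>
    have h1 : q + L + (t + 1) = (q + L + t) + 1 := by omega
    have h2 : q + (t + 1) = (q + t) + 1 := by omega
    rw [h1, h2]
    constructor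
    · show (solveStep K N Gs (trajA K N Gs i0 (q+L+t)).1 0 0).2 = _
      rw [ih.1]; rfl
    · show (trajA K N Gs i0 (q+L+t)).2 + (solveStep K N Gs (trajA K N Gs i0 (q+L+t)).1 0 0).1 = _
      rw [ih.1, ih.2]
      show _ = (trajA K N Gs i0 (q+t)).2 + (solveStep K N Gs (trajA K N Gs i0 (q+t)).1 0 0).1 + _
      ring

lemma traj_multiple (K N : Int) (Gs : List Int) (i0 : Int) (q L : Nat)
    (hp : (trajA K N Gs i0 (q + L)).1 = (trajA K N Gs i0 q).1) :
    ∀ (n s : Nat),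
      (trajA K N Gs i0 (q + n * L + s)).2
        = (trajA K N Gs i0 (q + s)).2
          + (n : Int) * ((trajA K N Gs i0 (q + L)).2 - (trajA K N Gs i0 q).2) := by
  intro n
  induction n with
  | zero => intro s; simp
  | succ n ih =>
    intro s
    have harg : q + (n + 1) * L + s = q + L + (n * L + s) := by ring
    rw [harg, (traj_periodic K N Gs i0 q L hp (n * L + s)).2]
    have harg2 : q + (n * L + s) = q + n * L + s := by ring
    rw [harg2, ih s]
    push_cast
    ring

lemma trajA_succ (K N : Int) (Gs : List Int) (i0 : Int) (m : Nat) :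
    trajA K N Gs i0 (m + 1)
      = ((solveStep K N Gs (trajA K N Gs i0 m).1 0 0).2,
         (trajA K N Gs i0 m).2 + (solveStep K N Gs (trajA K N Gs i0 m).1 0 0).1) := rfl

lemma trajA_of_nonpos (K N : Int) (Gs : List Int) (i0 : Int) (hN : N ≤ 0) :
    ∀ m, trajA K N Gs i0 m = (i0, 0) := by
  intro m
  induction m with
  | zero => rfl
  | succ m ih =>
    rw [trajA_succ, ih]
    rw [solveStep, dif_neg (by rintro ⟨-, h2⟩; omega)]
    simp

lemma solveStep_range (K N : Int) (Gs : List Int) (hN : 0 < N) :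
    ∀ i steps euro, 0 ≤ i → i < N →
      0 ≤ (solveStep K N Gs i steps euro).2 ∧ (solveStep K N Gs i steps euro).2 < N := by
  intro i steps euro
  induction i, steps, euro using solveStep.induct (K := K) (N := N) (Gs := Gs) with
  | case1 i steps euro h ih =>
    intro h0 h1
    rw [solveStep, dif_pos h]
    exact ih (PySem.Int.mod_nonneg _ hN) (PySem.Int.mod_lt _ hN)
  | case2 i steps euro h =>
    intro h0 h1
    rw [solveStep, dif_neg h]
    exact ⟨h0, h1⟩

-- A's loop computes the trajectory sum (loop invariant over base start i0 / base euros e0).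
lemma loopA_eq (K N : Int) (Gs : List Int) :
    ∀ (R r euro i : Int) (seen : PySem.Dict Int (Int × Int)) hs (i0 e0 : Int),
      0 ≤ r → r ≤ R →
      i = (trajA K N Gs i0 r.toNat).1 →
      euro = e0 + (trajA K N Gs i0 r.toNat).2 →
      (∀ p ∈ seen.items, p.1 = (trajA K N Gs i0 p.2.1.toNat).1
         ∧ p.2.2 = e0 + (trajA K N Gs i0 p.2.1.toNat).2) →
      solveLoop K N Gs R r euro i seen hs = e0 + (trajA K N Gs i0 R.toNat).2 := by
  intro R r euro i seen hs
  induction R, r, euro, i, seen, hs using solveLoop.induct (K := K) (N := N) (Gs := Gs) with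
  | case1 R r euro i seen hs hr seen' hn' hb' s c hm hmem hcb hclen hmnn hmlt ih =>
    intro i0 e0 h0r hrR hi he hseen
    rw [solveLoop.eq_def, dif_pos hr]
    simp only []
    split
    next c' hm' =>
      have hcc : c = c' := Option.some.inj (hm.symm.trans hm')
      subst hcc
      have hstep : (trajA K N Gs i0 (r.toNat + 1)).1 = s.2 := by rw [trajA_succ, ← hi]
      have hq : s.2 = (trajA K N Gs i0 c.1.toNat).1 ∧ c.2 = e0 + (trajA K N Gs i0 c.1.toNat).2 := by
        rcases (PySem.Dict.mem_items_insert _ _ _ _).mp hmem with h1 | h2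
        · have e1 : s.2 = i := congrArg Prod.fst h1
          have e2 : c = (r, euro) := congrArg Prod.snd h1
          rw [e2]
          exact ⟨by rw [e1, hi], by rw [he]⟩
        · simpa using hseen _ h2.1
      set qn := c.1.toNat with hqn
      set rn := r.toNat with hrn2
      set L := rn + 1 - qn with hL
      have hL1 : 1 ≤ L := by omega
      have hqL : qn + L = rn + 1 := by omega
      have hp : (trajA K N Gs i0 (qn + L)).1 = (trajA K N Gs i0 qn).1 := by
        rw [hqL, hstep, hq.1]
      set X := (R - c.1).toNat with hX
      have hXv : (R - c.1) = ((X : Nat) : Int) := by omega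
      have hLv : (r + 1 - c.1) = ((L : Nat) : Int) := by omega
      set n := X / L with hn
      set sr := X % L with hsr
      have hfd : PySem.Int.floordiv (R - c.1) (r + 1 - c.1) = ((n : Nat) : Int) := by
        rw [hXv, hLv, PySem.Int.floordiv_natCast]
      have hmd : PySem.Int.mod (R - c.1) (r + 1 - c.1) = ((sr : Nat) : Int) := by
        rw [hXv, hLv, PySem.Int.mod_natCast]
      rw [ih s.2 (c.2 + (euro + s.1 - c.2) * PySem.Int.floordiv (R - c.1) (r + 1 - c.1))
            le_rfl hmnn rfl (by simp [trajA])
            (by intro p hp'; simp [PySem.Dict.empty] at hp')]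
      have hmodNat : (PySem.Int.mod (R - c.1) (r + 1 - c.1)).toNat = sr := by
        rw [hmd]; simp
      rw [hmodNat, hq.1, traj_shift K N Gs i0 qn sr]
      have hCval : euro + s.1 - c.2
          = (trajA K N Gs i0 (qn + L)).2 - (trajA K N Gs i0 qn).2 := by
        have h2 : (trajA K N Gs i0 (rn + 1)).2 = (trajA K N Gs i0 rn).2 + s.1 := by
          rw [trajA_succ, ← hi]
        rw [hqL, h2, he, hq.2]
        ring
      have hmult := traj_multiple K N Gs i0 qn L hp n sr
      have hX2 : n * L + sr = X := by rw [hn, hsr, Nat.mul_comm]; exact Nat.div_add_mod X L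
      have hRtoNat : R.toNat = qn + n * L + sr := by
        rw [Nat.add_assoc, hX2]; omega
      rw [hRtoNat, hmult, hfd, hCval, hq.2]
      push_cast
      ring
    next hm' => exact absurd (hm'.symm.trans hm) (by simp)
  | case2 R r euro i seen hs hr seen' hn' hb' s hm ih =>
    intro i0 e0 h0r hrR hi he hseen
    rw [solveLoop.eq_def, dif_pos hr]
    simp only []
    split
    next c' hm' => exact absurd (hm'.symm.trans hm) (by simp)
    next hm' =>
      apply ih i0 e0 (by omega) (by omega)
      · have ht : (r + 1).toNat = r.toNat + 1 := by omega
        rw [ht, trajA_succ, ← hi]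
      · have ht : (r + 1).toNat = r.toNat + 1 := by omega
        rw [ht, trajA_succ, ← hi, he]
        ring
      · intro p hp
        rcases (PySem.Dict.mem_items_insert _ _ _ _).mp hp with h1 | h2
        · subst h1
          exact ⟨hi, by rw [he]⟩
        · exact hseen p h2.1
  | case3 R r euro i seen hs hr =>
    intro i0 e0 h0r hrR hi he hseen
    rw [solveLoop.eq_def, dif_neg hr]
    have : r = R := by omega
    subst this
    exact he

-- B's ride loop is A's step with the (commuted) same guard.
lemma rideB_eq (K N : Int) (Gs : List Int) :
    ∀ (e t j : Int), rideB K N Gs e t j = solveStep K N Gs j t e := by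
  intro e t j
  induction e, t, j using rideB.induct (K := K) (N := N) (Gs := Gs) with
  | case1 e t j h ih =>
    rw [rideB, dif_pos h, solveStep, dif_pos ⟨h.2, h.1⟩, ih]
  | case2 e t j h =>
    rw [rideB, dif_neg h, solveStep, dif_neg (by tauto)]

-- B's walk computes the trajectory sum.
lemma walkB_eq (K N : Int) (Gs : List Int) (hN : 0 < N)
    (table : List (Int × Int))
    (htable : ∀ j : Int, 0 ≤ j → j < N →
      PySem.List.pyGetD table j (0, 0) = solveStep K N Gs j 0 0) :
    ∀ (R : Int) (first : PySem.Dict Int Int) (prefixes : List Int) (i k tot : Int),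
      0 ≤ k → k ≤ R → 0 ≤ i → i < N →
      i = (trajA K N Gs 0 k.toNat).1 →
      tot = (trajA K N Gs 0 k.toNat).2 →
      prefixes = (List.range (k.toNat + 1)).map (fun m => (trajA K N Gs 0 m).2) →
      first.keys.Nodup →
      (∀ p ∈ first.items, 0 ≤ p.2 ∧ p.2 < k ∧ p.1 = (trajA K N Gs 0 p.2.toNat).1) →
      walkB R table first prefixes i k tot = (trajA K N Gs 0 R.toNat).2 := by
  intro R first prefixes i k tot
  induction first, prefixes, i, k, tot using walkB.induct (R := R) (table := table) with
  | case1 first prefixes i k tot h p ih =>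
    intro h0k hkR hi0 hiN hi htot hpre hnd hfirst
    rw [walkB.eq_def, dif_pos h]
    simp only []
    have hpv : p = solveStep K N Gs i 0 0 := htable i hi0 hiN
    have ht1 : (k + 1).toNat = k.toNat + 1 := by omega
    apply ih (by omega) (by omega)
    · rw [hpv]; exact (solveStep_range K N Gs hN i 0 0 hi0 hiN).1
    · rw [hpv]; exact (solveStep_range K N Gs hN i 0 0 hi0 hiN).2
    · rw [ht1, trajA_succ, ← hi, hpv]
    · rw [ht1, trajA_succ, ← hi, hpv, htot]
    · rw [ht1, List.range_succ, List.map_append, ← hpre]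
      simp only [List.map_cons, List.map_nil, trajA_succ]
      rw [← hi, ← hpv, htot]
    · exact PySem.Dict.nodup_keys_insert _ _ _ hnd
    · intro q hq
      rcases (PySem.Dict.mem_items_insert _ _ _ _).mp hq with h1 | h2
      · subst h1
        exact ⟨by omega, by omega, hi⟩
      · have := hfirst _ h2.1
        exact ⟨this.1, by omega, this.2.2⟩
  | case2 first prefixes i k tot h hRk =>
    intro h0k hkR hi0 hiN hi htot hpre hnd hfirst
    rw [walkB.eq_def, dif_neg h, if_pos hRk]
    have : k = R := by omega
    subst this
    exact htot
  | case3 first prefixes i k tot h hRk =>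
    intro h0k hkR hi0 hiN hi htot hpre hnd hfirst
    rw [walkB.eq_def, dif_neg h, if_neg hRk]
    simp only []
    have hkR' : k < R := by omega
    have hcont : first.contains i = true := by
      by_contra hc
      exact h ⟨hkR', by simpa using hc⟩
    obtain ⟨q, hq⟩ := Option.isSome_iff_exists.mp
      ((PySem.Dict.contains_eq_isSome_get? first i) ▸ hcont)
    have hgd : first.getD i 0 = q := PySem.Dict.getD_of_get?_eq_some _ _ hq
    have hqp := hfirst _ (PySem.Dict.mem_items_of_get?_eq_some _ hq)
    simp only at hqp
    rw [hgd]
    set qn := q.toNat with hqn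
    set kn := k.toNat with hkn
    set L := kn - qn with hL
    have hL1 : 1 ≤ L := by omega
    have hqL : qn + L = kn := by omega
    have hp : (trajA K N Gs 0 (qn + L)).1 = (trajA K N Gs 0 qn).1 := by
      rw [hqL, ← hi, hqp.2.2]
    set X := (R - q).toNat with hX
    have hXv : (R - q) = ((X : Nat) : Int) := by omega
    have hLv : (k - q) = ((L : Nat) : Int) := by omega
    set n := X / L with hn
    set sr := X % L with hsr
    have hsrL : sr < L := Nat.mod_lt _ (by omega)
    have hfd : PySem.Int.floordiv (R - q) (k - q) = ((n : Nat) : Int) := by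
      rw [hXv, hLv, PySem.Int.floordiv_natCast]
    have hmd : PySem.Int.mod (R - q) (k - q) = ((sr : Nat) : Int) := by
      rw [hXv, hLv, PySem.Int.mod_natCast]
    have hqcast : q = ((qn : Nat) : Int) := by omega
    have hlook : ∀ m : Nat, m < kn + 1 →
        PySem.List.pyGetD prefixes ((m : Nat) : Int) 0 = (trajA K N Gs 0 m).2 := by
      intro m hm
      rw [hpre, PySem.List.pyGetD_natCast, PySem.List.getD_map_range _ _ _ _ hm]
    rw [hmd, hfd, hqcast]
    rw [hlook qn (by omega)]
    have hidx2 : ((qn : Nat) : Int) + ((sr : Nat) : Int) = (((qn + sr : Nat) : Nat) : Int) := by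
      push_cast; ring
    rw [hidx2, hlook (qn + sr) (by omega)]
    have hmult := traj_multiple K N Gs 0 qn L hp n sr
    have hX2 : n * L + sr = X := by rw [hn, hsr, Nat.mul_comm]; exact Nat.div_add_mod X L
    have hRtoNat : R.toNat = qn + n * L + sr := by
      rw [Nat.add_assoc, hX2]; omega
    rw [hRtoNat, hmult, htot, hqL]
    ring

-- ===== VERDICT (by name: the statement is the Claim_ definition above) =====
theorem solve_spec : Claim_equal_solve := by
  intro R K N Gs hdom hpre
  unfold Spec_solve
  by_cases hR : R ≤ 0
  · rw [solve, solveLoop.eq_def, dif_neg (by omega)]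
    rw [solve_alt, if_pos (Or.inl hR)]
  · have hA : solve R K N Gs = 0 + (trajA K N Gs 0 R.toNat).2 := by
      rw [solve]
      exact loopA_eq K N Gs R 0 0 0 PySem.Dict.empty _ 0 0 le_rfl (by omega) rfl
        (by simp [trajA])
        (by intro p hp'; simp [PySem.Dict.empty] at hp')
    by_cases hN : N ≤ 0
    · rw [hA, solve_alt, if_pos (Or.inr hN), trajA_of_nonpos K N Gs 0 hN]
      simp
    · rw [hA, solve_alt, if_neg (by rintro (h1 | h2) <;> omega)]
      rw [walkB_eq K N Gs (by omega) _
        (by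
          intro j hj0 hjN
          rw [PySem.List.pyGetD_map_pyRange_of_nonneg _ N j _ hj0 hjN, rideB_eq])
        R PySem.Dict.empty [0] 0 0 0 le_rfl (by omega) le_rfl (by omega)
        rfl rfl (by simp [trajA])
        (by simp [PySem.Dict.empty, PySem.Dict.keys])
        (by intro p hp'; simp [PySem.Dict.empty] at hp')]
      ring
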